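-- pv_equiv track=rewrite | github.com/GrosoWoW/Practica | Intento/Cartera/Bonos/UtilesBonos.py | pivNear
-- ===== SOURCE A (Python) =====
-- def pivNear(dia, periodos):
--     '''
--     Funcion que entrega los indices de los periodos en el arreglo que colindan a la fecha a evaluar
--     :param: dia: Plazo correspondiente a la fecha a evaluar
--     :param: periodos: Arreglo de plazos
--     '''
--     pivotes = [-1,-1]
--     for i in range(len(periodos)):
--         if (dia < periodos[0]):
--             pivotes[1] = 0
--         elif(dia > periodos[len(periodos)-1]):
--             pivotes[0] = len(periodos)-1
--         elif(dia > periodos[i]):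
--             pivotes[1] = i+1
--             pivotes[0] = i
--         elif (dia == periodos[i]):
--             pivotes[0] = pivotes[1] = i
--     return pivotes
-- ===== SOURCE B (Python) =====
-- def pivNear(dia, periodos):
--     # Early-return guards plus a reverse scan with early exit, instead of
--     # A's full forward loop over a mutable two-cell list.
--     if not periodos:
--         return [-1, -1]
--     if dia < periodos[0]:
--         return [-1, 0]
--     if dia > periodos[-1]:
--         return [len(periodos) - 1, -1]
--     for j in range(len(periodos) - 1, -1, -1):
--         if periodos[j] == dia:
--             return [j, j]
--         if periodos[j] < dia:
--             return [j, j + 1]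
--     return [-1, -1]
-- ===== Notes on version B (the rewrite author's own statement) =====
-- stated objective: simpler
-- what changed: A's full forward loop that rewrites a mutable two-cell list on every iteration is replaced by early-return guards for the out-of-range cases plus a reverse scan that exits at the first element <= dia (A's result is determined by the last such index); the early exit also makes B measurably faster by a constant factor.
import Mathlib
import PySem

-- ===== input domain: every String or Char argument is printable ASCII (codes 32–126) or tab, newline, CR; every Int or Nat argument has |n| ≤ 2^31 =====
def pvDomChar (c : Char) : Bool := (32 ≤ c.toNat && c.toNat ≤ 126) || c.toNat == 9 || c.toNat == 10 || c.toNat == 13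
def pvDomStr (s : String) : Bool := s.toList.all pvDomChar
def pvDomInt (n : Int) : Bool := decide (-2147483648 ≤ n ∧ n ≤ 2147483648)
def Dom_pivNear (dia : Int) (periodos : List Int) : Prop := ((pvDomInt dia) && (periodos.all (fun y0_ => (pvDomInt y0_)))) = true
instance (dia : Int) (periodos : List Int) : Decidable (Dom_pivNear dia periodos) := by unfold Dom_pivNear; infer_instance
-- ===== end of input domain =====

-- B replaces A's full forward loop over a mutable two-cell list by early-return
-- guards plus a reverse scan that exits at the first element ≤ dia (objective: simpler).

-- ===== PORT A =====
-- A: pivotes = [-1,-1]; for i in range(len(periodos)): 4-way branch mutating pivotes.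
-- The loop's state (pivotes[0], pivotes[1]) is an Int × Int pair folded over range(len).
def pivNearLoop (dia : Int) (periodos : List Int) : Int × Int :=
  (List.range periodos.length).foldl (fun p i =>
    if dia < periodos.getD 0 0 then (p.1, 0)
    else if dia > periodos.getD (periodos.length - 1) 0 then ((periodos.length : Int) - 1, p.2)
    else if dia > periodos.getD i 0 then ((i : Int), (i : Int) + 1)
    else if dia = periodos.getD i 0 then ((i : Int), (i : Int))
    else p) (-1, -1)

def pivNear (dia : Int) (periodos : List Int) : List Int :=
  [(pivNearLoop dia periodos).1, (pivNearLoop dia periodos).2]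

-- ===== PORT B =====
-- reverse scan: j runs len-1, len-2, …, 0 with early exit (structural recursion on j+1)
def pivNearRev (dia : Int) (periodos : List Int) : Nat → List Int
  | 0 => [-1, -1]
  | j + 1 =>
    if periodos.getD j 0 = dia then [(j : Int), (j : Int)]
    else if periodos.getD j 0 < dia then [(j : Int), (j : Int) + 1]
    else pivNearRev dia periodos j

def pivNear_alt (dia : Int) (periodos : List Int) : List Int :=
  match periodos with
  | [] => [-1, -1]
  | _ :: _ =>
    if dia < periodos.getD 0 0 then [-1, 0]
    else if dia > periodos.getD (periodos.length - 1) 0 then [(periodos.length : Int) - 1, -1]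
    else pivNearRev dia periodos periodos.length

-- ===== PRECONDITION & SPEC =====
def Spec_pivNear (dia : Int) (periodos : List Int) (out : List Int) : Prop := out = pivNear_alt dia periodos
instance (dia : Int) (periodos : List Int) (out : List Int) : Decidable (Spec_pivNear dia periodos out) := by unfold Spec_pivNear; infer_instance

-- ===== CLAIM (what is proved, stated in full; the proofs are below) =====
def Claim_equal_pivNear : Prop := ∀ (dia : Int) (periodos : List Int), Dom_pivNear dia periodos → Spec_pivNear dia periodos (pivNear dia periodos)

-- ===== LEMMAS AND PROOFS =====

-- pair-valued reverse scan mirroring pivNearRev, used to characterise A's fold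
def rscanP (dia : Int) (periodos : List Int) : Nat → Int × Int
  | 0 => (-1, -1)
  | j + 1 =>
    if dia > periodos.getD j 0 then ((j : Int), (j : Int) + 1)
    else if dia = periodos.getD j 0 then ((j : Int), (j : Int))
    else rscanP dia periodos j

-- a truncated fold (first n iterations of A's loop) from an arbitrary init
def pivFoldN (dia : Int) (periodos : List Int) (n : Nat) (init : Int × Int) : Int × Int :=
  (List.range n).foldl (fun p i =>
    if dia < periodos.getD 0 0 then (p.1, 0)
    else if dia > periodos.getD (periodos.length - 1) 0 then ((periodos.length : Int) - 1, p.2)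
    else if dia > periodos.getD i 0 then ((i : Int), (i : Int) + 1)
    else if dia = periodos.getD i 0 then ((i : Int), (i : Int))
    else p) init

theorem pivNearLoop_eq_foldN (dia : Int) (periodos : List Int) :
    pivNearLoop dia periodos = pivFoldN dia periodos periodos.length (-1, -1) := rfl

theorem pivFoldN_succ (dia : Int) (periodos : List Int) (m : Nat) (init : Int × Int) :
    pivFoldN dia periodos (m + 1) init =
      (if dia < periodos.getD 0 0 then ((pivFoldN dia periodos m init).1, 0)
       else if dia > periodos.getD (periodos.length - 1) 0 then ((periodos.length : Int) - 1, (pivFoldN dia periodos m init).2)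
       else if dia > periodos.getD m 0 then ((m : Int), (m : Int) + 1)
       else if dia = periodos.getD m 0 then ((m : Int), (m : Int))
       else pivFoldN dia periodos m init) := by
  unfold pivFoldN
  rw [List.range_succ, List.foldl_append, List.foldl_cons, List.foldl_nil]

-- case dia < periodos[0]
theorem pivFoldN_lt (dia : Int) (periodos : List Int)
    (h : dia < periodos.getD 0 0) (n : Nat) (init : Int × Int) :
    pivFoldN dia periodos n init = if n = 0 then init else (init.1, 0) := by
  induction n with
  | zero => rfl
  | succ m ih =>
    rw [pivFoldN_succ, ih, if_pos h]
    cases m <;> simp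

-- case ¬(dia < periodos[0]) ∧ dia > periodos[last]
theorem pivFoldN_gt (dia : Int) (periodos : List Int)
    (h1 : ¬ dia < periodos.getD 0 0) (h2 : dia > periodos.getD (periodos.length - 1) 0)
    (n : Nat) (init : Int × Int) :
    pivFoldN dia periodos n init = if n = 0 then init else ((periodos.length : Int) - 1, init.2) := by
  induction n with
  | zero => rfl
  | succ m ih =>
    rw [pivFoldN_succ, ih, if_neg h1, if_pos h2]
    cases m <;> simp

-- middle case: the forward fold equals the reverse early-exit scan
theorem pivFoldN_mid (dia : Int) (periodos : List Int)
    (h1 : ¬ dia < periodos.getD 0 0) (h2 : ¬ dia > periodos.getD (periodos.length - 1) 0)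
    (n : Nat) :
    pivFoldN dia periodos n (-1, -1) = rscanP dia periodos n := by
  induction n with
  | zero => rfl
  | succ m ih =>
    rw [pivFoldN_succ, ih, if_neg h1, if_neg h2]
    rfl

-- B's reverse scan lists are exactly the pair scan's components
theorem pivNearRev_eq_rscanP (dia : Int) (periodos : List Int) (n : Nat) :
    pivNearRev dia periodos n = [(rscanP dia periodos n).1, (rscanP dia periodos n).2] := by
  induction n with
  | zero => rfl
  | succ j ih =>
    simp only [pivNearRev, rscanP, ih]
    split_ifs <;> first | rfl | omega

-- ===== VERDICT (by name: the statement is the Claim_ definition above) =====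
theorem pivNear_spec : Claim_equal_pivNear := by
  intro dia periodos _
  unfold Spec_pivNear pivNear
  rw [pivNearLoop_eq_foldN]
  cases periodos with
  | nil => rfl
  | cons a l =>
    unfold pivNear_alt
    by_cases h1 : dia < (a :: l).getD 0 0
    · rw [pivFoldN_lt dia (a :: l) h1, if_pos h1]
      simp
    · by_cases h2 : dia > (a :: l).getD ((a :: l).length - 1) 0
      · rw [pivFoldN_gt dia (a :: l) h1 h2, if_neg h1, if_pos h2]
        simp
      · rw [pivFoldN_mid dia (a :: l) h1 h2, if_neg h1, if_neg h2,
          pivNearRev_eq_rscanP]
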